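-- pv_equiv track=rewrite | github.com/njooma/aoc-2025 | day7.py | part1
-- ===== SOURCE A (Python) =====
-- def part1(inp: str) -> int:
--     splitters = []
--     for line in inp.split("\n"):
--         s = [i for i, val in enumerate(line) if val == "^"]
--         if s:
--             splitters.append(s)
--
--     total = 1
--     while len(splitters) > 0:
--         line = splitters.pop()
--         for splitter in line:
--             for s in reversed(splitters):
--                 if splitter in s:
--                     break
--                 if (splitter + 1) in s or (splitter - 1) in s:
--                     total += 1
--                     break
--
--     return total
-- ===== SOURCE B (Python) =====
-- def part1(inp: str) -> int:
--     lines = []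
--     for line in inp.split("\n"):
--         s = [i for i, val in enumerate(line) if val == "^"]
--         if s:
--             lines.append(s)
--
--     total = 1
--     last = {}
--     for i, cols in enumerate(lines):
--         for c in cols:
--             cands = [last[x] for x in (c - 1, c, c + 1) if x in last]
--             if cands:
--                 j = max(cands)
--                 if last.get(c) != j:
--                     total += 1
--         for c in cols:
--             last[c] = i
--     return total
-- ===== Notes on version B (the rewrite author's own statement) =====
-- stated objective: alternative
-- what changed: Replaces A's per-splitter reverse scan over all earlier lines (pop-and-rescan) by a single forward pass keeping a dict from column to the most recent line containing a splitter, resolving each splitter with three lookups and a max.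
import Mathlib
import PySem

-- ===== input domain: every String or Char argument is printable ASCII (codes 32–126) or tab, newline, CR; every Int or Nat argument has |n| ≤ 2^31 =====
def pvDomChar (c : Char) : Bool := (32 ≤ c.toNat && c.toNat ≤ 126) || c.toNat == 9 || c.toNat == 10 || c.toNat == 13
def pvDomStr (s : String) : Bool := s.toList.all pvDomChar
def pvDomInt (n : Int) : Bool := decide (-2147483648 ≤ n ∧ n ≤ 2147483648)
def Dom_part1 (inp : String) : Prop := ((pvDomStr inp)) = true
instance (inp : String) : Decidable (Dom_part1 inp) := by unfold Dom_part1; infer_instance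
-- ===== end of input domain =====

-- B replaces A's per-splitter reverse scan over earlier lines by one forward pass keeping a
-- dict of each column's most recent line; same return value (objective: alternative).

-- ===== PORT A =====
-- [i for i, val in enumerate(line) if val == "^"]
def part1Cols (line : List Char) : List Int :=
  (PySem.List.enumerate line).filterMap (fun p => if p.2 = '^' then some p.1 else none)

-- the first loop building `splitters`
def part1Splitters (inp : String) : List (List Int) :=
  (PySem.Chars.splitOn inp.toList ['\n']).foldl
    (fun acc line => let s := part1Cols line; if s ≠ [] then acc ++ [s] else acc) []

-- the inner `for s in reversed(splitters)` scan for one splitter (0 or 1 added to total)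
def part1Scan (c : Int) : List (List Int) → Int
  | [] => 0
  | s :: rest =>
    if c ∈ s then 0
    else if (c + 1) ∈ s ∨ (c - 1) ∈ s then 1
    else part1Scan c rest

-- the `while len(splitters) > 0` loop: pop the last line, scan the rest
def part1Loop (sp : List (List Int)) (total : Int) : Int :=
  if h : sp = [] then total
  else
    let line := sp.getLast h
    let rest := sp.dropLast
    part1Loop rest (line.foldl (fun t c => t + part1Scan c rest.reverse) total)
termination_by sp.length
decreasing_by
  have : sp.length ≠ 0 := fun hl => h (List.eq_nil_of_length_eq_zero hl)
  simp [List.length_dropLast]; omega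

def part1 (inp : String) : Int :=
  part1Loop (part1Splitters inp) 1

-- ===== PORT B =====
-- Source B builds the same filtered per-line splitter lists
def part1AltLines (inp : String) : List (List Int) :=
  (PySem.Chars.splitOn inp.toList ['\n']).foldl
    (fun acc line =>
      let s := (PySem.List.enumerate line).filterMap (fun p => if p.2 = '^' then some p.1 else none)
      if s ≠ [] then acc ++ [s] else acc) []

-- `for i, cols in enumerate(lines): …` with the dict `last` of most-recent line per column
def part1AltLoop (rows : List (Int × List Int)) (total : Int) (last : PySem.Dict Int Int) : Int :=
  match rows with
  | [] => total
  | (i, cols) :: rest =>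
    let total' := cols.foldl (fun t c =>
      let cands := [c - 1, c, c + 1].filterMap (fun x => last.get? x)
      match PySem.List.max? cands (fun y => y) with
      | none => t
      | some j => if last.get? c ≠ some j then t + 1 else t) total
    let last' := cols.foldl (fun d c => d.insert c i) last
    part1AltLoop rest total' last'

def part1_alt (inp : String) : Int :=
  part1AltLoop (PySem.List.enumerate (part1AltLines inp)) 1 PySem.Dict.empty

-- ===== PRECONDITION & SPEC =====
def Spec_part1 (inp : String) (out : Int) : Prop := out = part1_alt inp
instance (inp : String) (out : Int) : Decidable (Spec_part1 inp out) := by unfold Spec_part1; infer_instance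

-- ===== CLAIM (what is proved, stated in full; the proofs are below) =====
def Claim_equal_part1 : Prop := ∀ (inp : String), Dom_part1 inp → Spec_part1 inp (part1 inp)

-- ===== LEMMAS AND PROOFS =====

-- the last line index (counting from i) whose splitter list contains x
def lastIdxGo (x : Int) : List (List Int) → Int → Option Int
  | [], _ => none
  | s :: rest, i =>
    match lastIdxGo x rest (i + 1) with
    | some j => some j
    | none => if x ∈ s then some i else none

-- total contribution of the lines in `rest`, given the already-processed prefix `pref`
-- contribution of one column c computed from the most-recent-line function f (B's per-c step)
def bContrib (f : Int → Option Int) (c : Int) : Int :=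
  match PySem.List.max? ([c - 1, c, c + 1].filterMap f) (fun y => y) with
  | none => 0
  | some j => if f c ≠ some j then 1 else 0

-- total contribution of the lines of `rest`, given the already-seen prefix `pref`
def sumContrib (pref rest : List (List Int)) : Int :=
  match rest with
  | [] => 0
  | line :: rest' =>
    (line.foldl (fun t c => t + part1Scan c pref.reverse) 0) + sumContrib (pref ++ [line]) rest'

lemma lastIdxGo_snoc (x : Int) (p : List (List Int)) (s : List Int) (i : Int) :
    lastIdxGo x (p ++ [s]) i = if x ∈ s then some (i + p.length) else lastIdxGo x p i := by
  induction p generalizing i with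
  | nil => simp [lastIdxGo]
  | cons s0 p' ih =>
    simp only [List.cons_append, lastIdxGo, ih (i + 1)]
    by_cases hx : x ∈ s
    · simp only [hx, if_true]
      congr 1
      simp only [List.length_cons]
      push_cast
      ring
    · simp [hx]

lemma lastIdxGo_bound (x : Int) (p : List (List Int)) (i j : Int)
    (h : lastIdxGo x p i = some j) : i ≤ j ∧ j < i + p.length := by
  induction p generalizing i with
  | nil => simp [lastIdxGo] at h
  | cons s0 p' ih =>
    simp only [lastIdxGo] at h
    rcases hr : lastIdxGo x p' (i + 1) with _ | j'
    · rw [hr] at h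
      by_cases hx : x ∈ s0 <;> simp [hx] at h
      subst h; simp only [List.length_cons]
      constructor
      · omega
      · push_cast; omega
    · rw [hr] at h; simp at h; subst h
      have := ih (i + 1) hr
      simp only [List.length_cons]
      constructor
      · omega
      · push_cast; omega

lemma max?_eq_of_mem_of_le (xs : List Int) (m : Int) (hm : m ∈ xs)
    (h : ∀ y ∈ xs, y ≤ m) : PySem.List.max? xs (fun y => y) = some m := by
  cases xs with
  | nil => simp at hm
  | cons x t =>
    rw [PySem.List.max?_id_cons]
    congr 1
    have hmem : t.foldl max x ∈ x :: t := by
      have key : ∀ (t : List Int) (x : Int), t.foldl max x = x ∨ t.foldl max x ∈ t := by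
        intro t; induction t with
        | nil => simp
        | cons a t ih =>
          intro x
          simp only [List.foldl_cons, List.mem_cons]
          rcases max_choice x a with h2 | h2
          · rw [h2]; rcases ih x with h1 | h1 <;> simp [h1]
          · rw [h2]; rcases ih a with h1 | h1 <;> simp [h1]
      rcases key t x with h1 | h1 <;> simp [h1]
    have hub : ∀ y ∈ x :: t, y ≤ t.foldl max x := by
      intro y hy
      rcases List.mem_cons.mp hy with rfl | hy
      · exact (PySem.List.le_foldl_max t y).1
      · exact (PySem.List.le_foldl_max t x).2 y hy
    exact le_antisymm (h _ hmem) (hub m hm)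

-- A's reverse scan over the prefix equals B's dict computation on lastIdxGo
lemma scan_eq_bContrib (c : Int) (pref : List (List Int)) :
    part1Scan c pref.reverse = bContrib (fun x => lastIdxGo x pref 0) c := by
  induction pref using List.reverseRecOn with
  | nil => simp [part1Scan, bContrib, lastIdxGo, PySem.List.max?]
  | append_singleton p s ih =>
    have hf : ∀ x, lastIdxGo x (p ++ [s]) 0 = if x ∈ s then some (p.length : Int) else lastIdxGo x p 0 := by
      intro x; rw [lastIdxGo_snoc]; simp
    have hbound : ∀ x j, lastIdxGo x p 0 = some j → 0 ≤ j ∧ j < p.length := by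
      intro x j h; have := lastIdxGo_bound x p 0 j h; omega
    have hle : ∀ y ∈ [c - 1, c, c + 1].filterMap (fun x => lastIdxGo x (p ++ [s]) 0),
        y ≤ (p.length : Int) := by
      intro y hy
      simp only [List.mem_filterMap] at hy
      obtain ⟨x, _, hx⟩ := hy
      rw [hf x] at hx
      by_cases hxs : x ∈ s
      · simp [hxs] at hx; omega
      · simp [hxs] at hx; have := hbound x y hx; omega
    rw [List.reverse_append, List.reverse_singleton, List.singleton_append]
    by_cases hc : c ∈ s
    · -- first branch of A: c itself is on the nearest line, contribute 0
      have hmem : (p.length : Int) ∈ [c - 1, c, c + 1].filterMap (fun x => lastIdxGo x (p ++ [s]) 0) := by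
        simp only [List.mem_filterMap]
        exact ⟨c, by simp, by rw [hf]; simp [hc]⟩
      simp only [part1Scan, hc, if_pos, bContrib]
      rw [max?_eq_of_mem_of_le _ _ hmem hle]
      simp [hf, hc]
    · by_cases hadj : (c + 1) ∈ s ∨ (c - 1) ∈ s
      · -- adjacent column on the nearest line, contribute 1
        have hmem : (p.length : Int) ∈ [c - 1, c, c + 1].filterMap (fun x => lastIdxGo x (p ++ [s]) 0) := by
          simp only [List.mem_filterMap]
          rcases hadj with h1 | h1
          · exact ⟨c + 1, by simp, by rw [hf]; simp [h1]⟩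
          · exact ⟨c - 1, by simp, by rw [hf]; simp [h1]⟩
        simp only [part1Scan, hc, if_neg, if_pos hadj, bContrib]
        rw [max?_eq_of_mem_of_le _ _ hmem hle]
        have : lastIdxGo c (p ++ [s]) 0 ≠ some (p.length : Int) := by
          rw [hf]; simp only [hc, if_false]
          rcases h : lastIdxGo c p 0 with _ | j
          · simp
          · have := hbound c j h
            simp only [ne_eq, Option.some.injEq]
            omega
        simp [this]
      · -- neither: the new last line is irrelevant for c, fall through to the prefix
        have hsame : ∀ x ∈ [c - 1, c, c + 1], lastIdxGo x (p ++ [s]) 0 = lastIdxGo x p 0 := by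
          intro x hx
          rw [hf]
          have : x ∉ s := by
            simp only [List.mem_cons, List.mem_singleton] at hx
            push_neg at hadj
            rcases hx with rfl | rfl | hx
            · exact hadj.2
            · exact hc
            · simp at hx; subst hx; exact hadj.1
          simp [this]
        simp only [part1Scan, hc, if_neg, hadj, if_false, ih, bContrib]
        rw [List.filterMap_congr (fun x hx => hsame x hx)]
        simp only [hsame c (by simp : c ∈ [c - 1, c, c + 1])]

lemma foldl_add_shift (h : Int → Int) (cols : List Int) (t : Int) :
    cols.foldl (fun t c => t + h c) t = t + cols.foldl (fun t c => t + h c) 0 := by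
  induction cols generalizing t with
  | nil => simp
  | cons c cs ih => simp only [List.foldl]; rw [ih, ih (0 + h c)]; ring

lemma get?_foldl_insert (cols : List Int) (last : PySem.Dict Int Int) (i x : Int) :
    (cols.foldl (fun d c => d.insert c i) last).get? x =
      if x ∈ cols then some i else last.get? x := by
  induction cols generalizing last with
  | nil => simp
  | cons c cs ih =>
    simp only [List.foldl, ih, PySem.Dict.get?_insert, List.mem_cons]
    by_cases h1 : x ∈ cs <;> by_cases h2 : x = c <;> simp [h1, h2]

lemma sumContrib_snoc (rest : List (List Int)) : ∀ pref line,
    sumContrib pref (rest ++ [line]) =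
      sumContrib pref rest + line.foldl (fun t c => t + part1Scan c (pref ++ rest).reverse) 0 := by
  induction rest with
  | nil => intro pref line; simp [sumContrib]
  | cons r rest' ih =>
    intro pref line
    simp only [List.cons_append, sumContrib, ih (pref ++ [r]) line, List.append_assoc,
      List.singleton_append]
    simp [add_assoc]

lemma part1Loop_eq (sp : List (List Int)) : ∀ total, part1Loop sp total = total + sumContrib [] sp := by
  induction sp using List.reverseRecOn with
  | nil => intro total; rw [part1Loop]; simp [sumContrib]
  | append_singleton sp' line ih =>
    intro total
    rw [part1Loop]
    simp only [List.append_ne_nil_of_right_ne_nil _ (by simp : ([line] : List (List Int)) ≠ []),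
      dite_false, List.getLast_concat, List.dropLast_concat]
    rw [ih, sumContrib_snoc, foldl_add_shift (fun c => part1Scan c sp'.reverse)]
    simp only [List.nil_append]
    ring

lemma part1AltLoop_eq (rest : List (List Int)) :
    ∀ (pref : List (List Int)) (total : Int) (last : PySem.Dict Int Int),
    (∀ x, last.get? x = lastIdxGo x pref 0) →
    part1AltLoop (PySem.List.enumerate rest (pref.length : Int)) total last =
      total + sumContrib pref rest := by
  induction rest with
  | nil => intro pref total last _; simp [part1AltLoop, sumContrib]
  | cons cols rest' ih =>
    intro pref total last hinv
    rw [PySem.List.enumerate_cons]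
    simp only [part1AltLoop]
    have hstep : (cols.foldl (fun t c =>
        let cands := [c - 1, c, c + 1].filterMap (fun x => last.get? x)
        match PySem.List.max? cands (fun y => y) with
        | none => t
        | some j => if last.get? c ≠ some j then t + 1 else t) total) =
        total + cols.foldl (fun t c => t + part1Scan c pref.reverse) 0 := by
      have hbody : ∀ (t c : Int),
          (let cands := [c - 1, c, c + 1].filterMap (fun x => last.get? x)
           match PySem.List.max? cands (fun y => y) with
           | none => t
           | some j => if last.get? c ≠ some j then t + 1 else t) =
          t + part1Scan c pref.reverse := by
        intro t c
        rw [scan_eq_bContrib]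
        simp only [bContrib]
        rw [List.filterMap_congr (fun x _ => hinv x)]
        simp only [hinv c]
        rcases PySem.List.max? ([c - 1, c, c + 1].filterMap fun x => lastIdxGo x pref 0)
            (fun y => y) with _ | j
        · simp
        · by_cases h : lastIdxGo c pref 0 ≠ some j <;> simp [h]
      calc cols.foldl _ total
          = cols.foldl (fun t c => t + part1Scan c pref.reverse) total := by
            induction cols generalizing total with
            | nil => rfl
            | cons c0 cs ihc => simp only [List.foldl_cons, hbody total c0]; exact ihc _
        _ = total + cols.foldl (fun t c => t + part1Scan c pref.reverse) 0 :=
            foldl_add_shift _ cols total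
    have hinv' : ∀ x, (cols.foldl (fun d c => d.insert c (pref.length : Int)) last).get? x =
        lastIdxGo x (pref ++ [cols]) 0 := by
      intro x
      rw [get?_foldl_insert, lastIdxGo_snoc, hinv x]
      simp
    have hlen : ((pref.length : Int) + 1) = (((pref ++ [cols]).length : Nat) : Int) := by
      simp
    rw [hstep, hlen, ih (pref ++ [cols]) _ _ hinv', sumContrib]
    ring

lemma lines_eq (inp : String) : part1AltLines inp = part1Splitters inp := rfl

-- ===== VERDICT (by name: the statement is the Claim_ definition above) =====
theorem part1_spec : Claim_equal_part1 := by
  intro inp _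
  unfold Spec_part1 part1 part1_alt
  rw [lines_eq]
  rw [part1Loop_eq]
  rw [show PySem.List.enumerate (part1Splitters inp) =
      PySem.List.enumerate (part1Splitters inp) (([] : List (List Int)).length : Int) by simp]
  rw [part1AltLoop_eq (part1Splitters inp) [] 1 PySem.Dict.empty (by intro x; simp [lastIdxGo, PySem.Dict.get?, PySem.Dict.empty])]
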